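-- pv_equiv track=rewrite | github.com/wassimhaoues/TUN_STT_MODEL | training/analyze_errors.py | max_repetition_run
-- ===== SOURCE A (Python) =====
-- def max_repetition_run(tokens: list[str]) -> int:
--     longest_run = 1 if tokens else 0
--
--     for index, token in enumerate(tokens):
--         run_length = 1
--         next_index = index + 1
--         while next_index < len(tokens) and tokens[next_index] == token:
--             run_length += 1
--             next_index += 1
--         longest_run = max(longest_run, run_length)
--
--     for ngram_size in (2, 3):
--         stop = len(tokens) - (2 * ngram_size) + 1
--         for index in range(max(stop, 0)):
--             current_ngram = tokens[index : index + ngram_size]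
--             repeat_count = 1
--             probe = index + ngram_size
--             while probe + ngram_size <= len(tokens):
--                 next_ngram = tokens[probe : probe + ngram_size]
--                 if next_ngram != current_ngram:
--                     break
--                 repeat_count += 1
--                 probe += ngram_size
--             longest_run = max(longest_run, repeat_count)
--
--     return longest_run
-- ===== SOURCE B (Python) =====
-- def max_repetition_run(tokens: list[str]) -> int:
--     n = len(tokens)
--     if n == 0:
--         return 0
--     # single pass: longest run of equal consecutive tokens
--     best = 1
--     cur = 1
--     for i in range(1, n):
--         cur = cur + 1 if tokens[i] == tokens[i - 1] else 1
--         if cur > best: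
--             best = cur
--     # ngram runs via back-to-front DP: reps[i] = number of consecutive
--     # copies of the k-gram starting at i (adjacent-block comparisons)
--     for k in (2, 3):
--         m = n - 2 * k + 1
--         if m <= 0:
--             continue
--         reps = [1] * (n - k + 1)
--         for i in range(m - 1, -1, -1):
--             if tokens[i:i + k] == tokens[i + k:i + 2 * k]:
--                 reps[i] = 1 + reps[i + k]
--         top = max(reps[:m])
--         if top > best:
--             best = top
--     return best
-- ===== Notes on version B (the rewrite author's own statement) =====
-- stated objective: faster
-- what changed: A's quadratic per-start scans are replaced by one single pass counting consecutive equal tokens plus, for each ngram size, a back-to-front DP array reps[i] = 1 + reps[i+k] built from adjacent-block comparisons, so every inner while-loop disappears.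
import Mathlib
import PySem

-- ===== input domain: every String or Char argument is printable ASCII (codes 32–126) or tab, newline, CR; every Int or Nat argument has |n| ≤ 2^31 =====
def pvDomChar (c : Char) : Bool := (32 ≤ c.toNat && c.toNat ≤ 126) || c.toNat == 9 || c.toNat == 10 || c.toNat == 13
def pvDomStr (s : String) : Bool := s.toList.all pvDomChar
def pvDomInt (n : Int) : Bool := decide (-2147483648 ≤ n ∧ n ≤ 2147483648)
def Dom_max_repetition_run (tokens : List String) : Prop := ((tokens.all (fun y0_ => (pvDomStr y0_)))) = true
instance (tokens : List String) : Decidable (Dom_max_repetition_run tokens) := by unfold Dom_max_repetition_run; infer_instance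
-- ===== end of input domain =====

-- B replaces A's quadratic per-index scans by one consecutive-counting pass plus a
-- back-to-front DP over ngram starts (objective: faster).

-- ===== PORT A =====
-- inner while of the first loop: counts next indices matching `token`
def pvRunCount (tokens : List String) (token : String) (next : Nat) : Nat :=
  if h : next < tokens.length ∧ tokens.getD next "" = token then
    1 + pvRunCount tokens token (next + 1)
  else 0
termination_by tokens.length - next
decreasing_by omega

-- inner while of the ngram loops: counts successive ngrams equal to `cur`
-- (the `0 < k` conjunct only makes the recursion total; A calls it with k = 2, 3)
def pvNgramCount (tokens cur : List String) (k probe : Nat) : Nat :=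
  if h : probe + k ≤ tokens.length ∧ 0 < k then
    if PySem.List.slice tokens (some ((probe : Nat) : Int)) (some ((probe + k : Nat) : Int)) = cur then
      1 + pvNgramCount tokens cur k (probe + k)
    else 0
  else 0
termination_by tokens.length - probe
decreasing_by omega

def max_repetition_run (tokens : List String) : Int :=
  let n := tokens.length
  -- for index, token in enumerate(tokens): run_length = 1 + matches after index
  let l1 := (List.range n).foldl
    (fun acc i => max acc (1 + pvRunCount tokens (tokens.getD i "") (i + 1)))
    (if n = 0 then 0 else 1)
  -- for ngram_size in (2, 3): for index in range(max(stop, 0)): …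
  let l2 := [2, 3].foldl
    (fun acc k => (List.range (n + 1 - 2 * k)).foldl
      (fun a2 i => max a2 (1 + pvNgramCount tokens
          (PySem.List.slice tokens (some ((i : Nat) : Int)) (some ((i + k : Nat) : Int))) k (i + k)))
      acc) l1
  (l2 : Int)

-- ===== PORT B =====
-- cur = cur + 1 if tokens[i] == tokens[i-1] else 1; best updated when cur exceeds it
def pvScanStep (tokens : List String) (p : Nat × Nat) (i : Nat) : Nat × Nat :=
  let cur := if tokens.getD i "" = tokens.getD (i - 1) "" then p.2 + 1 else 1
  (if cur > p.1 then cur else p.1, cur)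

-- reps[i] = 1 + reps[i+k] when the k-gram at i equals the k-gram at i+k
def pvRepsStep (tokens : List String) (k : Nat) (arr : List Nat) (i : Nat) : List Nat :=
  if PySem.List.slice tokens (some ((i : Nat) : Int)) (some ((i + k : Nat) : Int))
      = PySem.List.slice tokens (some ((i + k : Nat) : Int)) (some ((i + k + k : Nat) : Int)) then
    arr.set i (1 + arr.getD (i + k) 1)
  else arr

def max_repetition_run_alt (tokens : List String) : Int :=
  let n := tokens.length
  if n = 0 then 0 else
    let best := ((List.range' 1 (n - 1)).foldl (pvScanStep tokens) (1, 1)).1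
    let best := [2, 3].foldl (fun best k =>
      let m := n + 1 - 2 * k
      if m = 0 then best else
        let reps := ((List.range m).reverse).foldl (pvRepsStep tokens k)
          (List.replicate (n + 1 - k) 1)
        -- max(reps[:m]): all entries are ≥ 1, so folding max from 0 is exact
        let top := (reps.take m).foldl max 0
        if top > best then top else best) best
    (best : Int)

-- ===== PRECONDITION & SPEC =====
def Spec_max_repetition_run (tokens : List String) (out : Int) : Prop := out = max_repetition_run_alt tokens
instance (tokens : List String) (out : Int) : Decidable (Spec_max_repetition_run tokens out) := by unfold Spec_max_repetition_run; infer_instance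

-- ===== CLAIM (what is proved, stated in full; the proofs are below) =====
def Claim_equal_max_repetition_run : Prop := ∀ (tokens : List String), Dom_max_repetition_run tokens → Spec_max_repetition_run tokens (max_repetition_run tokens)

-- ===== LEMMAS AND PROOFS =====

-- forward run after i, by adjacent comparisons
def pvD (tokens : List String) (i : Nat) : Nat :=
  if h : i + 1 < tokens.length ∧ tokens.getD (i + 1) "" = tokens.getD i "" then
    1 + pvD tokens (i + 1)
  else 0
termination_by tokens.length - i
decreasing_by omega

-- backward run ending at j
def pvG (tokens : List String) : Nat → Nat
  | 0 => 1
  | j + 1 => if tokens.getD (j + 1) "" = tokens.getD j "" then pvG tokens j + 1 else 1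

-- number of consecutive copies of the k-gram starting at i
def pvR (tokens : List String) (k i : Nat) : Nat :=
  if h : i + 2 * k ≤ tokens.length ∧ 0 < k ∧
      (tokens.drop i).take k = (tokens.drop (i + k)).take k then
    1 + pvR tokens k (i + k)
  else 1
termination_by tokens.length - i
decreasing_by omega

theorem pvRunCount_eq_D (tokens : List String) (i : Nat) :
    pvRunCount tokens (tokens.getD i "") (i + 1) = pvD tokens i := by
  rw [pvRunCount, pvD]
  by_cases hc : i + 1 < tokens.length ∧ tokens.getD (i + 1) "" = tokens.getD i ""
  · rw [dif_pos hc, dif_pos hc]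
    have ih := pvRunCount_eq_D tokens (i + 1)
    rw [hc.2] at ih
    rw [ih]
  · rw [dif_neg hc, dif_neg hc]
termination_by tokens.length - i
decreasing_by omega

theorem pvG_pos (tokens : List String) (j : Nat) : 1 ≤ pvG tokens j := by
  cases j with
  | zero => simp [pvG]
  | succ j => rw [pvG]; split <;> omega

theorem pvD_chain (tokens : List String) (d : Nat) : ∀ i, d ≤ pvD tokens i → i < tokens.length →
    (∀ m < d, tokens.getD (i + m + 1) "" = tokens.getD (i + m) "") ∧ i + d < tokens.length := by
  induction d with
  | zero => intro i _ hi; exact ⟨fun m hm => absurd hm (by omega), by omega⟩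
  | succ d ih =>
    intro i hd hi
    rw [pvD] at hd
    by_cases hc : i + 1 < tokens.length ∧ tokens.getD (i + 1) "" = tokens.getD i ""
    · rw [dif_pos hc] at hd
      obtain ⟨hch, hb⟩ := ih (i + 1) (by omega) hc.1
      refine ⟨fun m hm => ?_, by omega⟩
      cases m with
      | zero => simpa using hc.2
      | succ m =>
        have h1 : i + (m + 1) + 1 = i + 1 + m + 1 := by omega
        have h2 : i + (m + 1) = i + 1 + m := by omega
        rw [h1, h2]; exact hch m (by omega)
    · rw [dif_neg hc] at hd; omega

theorem pvG_chain (tokens : List String) (j : Nat) : ∀ d, pvG tokens j = d + 1 →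
    d ≤ j ∧ ∀ m < d, tokens.getD (j - m) "" = tokens.getD (j - m - 1) "" := by
  induction j with
  | zero =>
    intro d hd
    simp [pvG] at hd
    exact ⟨by omega, fun m hm => absurd hm (by omega)⟩
  | succ j ih =>
    intro d hd
    rw [pvG] at hd
    by_cases hc : tokens.getD (j + 1) "" = tokens.getD j ""
    · rw [if_pos hc] at hd
      cases d with
      | zero => exact ⟨by omega, fun m hm => absurd hm (by omega)⟩
      | succ d =>
        obtain ⟨hdj, hch⟩ := ih d (by omega)
        refine ⟨by omega, fun m hm => ?_⟩
        cases m with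
        | zero => simpa using hc
        | succ m =>
          have h1 : j + 1 - (m + 1) = j - m := by omega
          rw [h1]; exact hch m (by omega)
    · rw [if_neg hc] at hd
      have : d = 0 := by omega
      subst this
      exact ⟨by omega, fun m hm => absurd hm (by omega)⟩

theorem pvD_of_chain (tokens : List String) (d : Nat) : ∀ i,
    (∀ m < d, tokens.getD (i + m + 1) "" = tokens.getD (i + m) "") → i + d < tokens.length →
    d ≤ pvD tokens i := by
  induction d with
  | zero => intro i _ _; omega
  | succ d ih =>
    intro i hch hb
    rw [pvD]
    have h0 := hch 0 (by omega)
    simp only [Nat.add_zero] at h0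
    rw [dif_pos ⟨by omega, h0⟩]
    have : d ≤ pvD tokens (i + 1) := by
      refine ih (i + 1) (fun m hm => ?_) (by omega)
      have h1 : i + 1 + m + 1 = i + (m + 1) + 1 := by omega
      have h2 : i + 1 + m = i + (m + 1) := by omega
      rw [h1, h2]; exact hch (m + 1) (by omega)
    omega

theorem pvG_of_chain (tokens : List String) (d : Nat) : ∀ j,
    (∀ m < d, tokens.getD (j - m) "" = tokens.getD (j - m - 1) "") → d ≤ j →
    d + 1 ≤ pvG tokens j := by
  induction d with
  | zero => intro j _ _; exact pvG_pos tokens j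
  | succ d ih =>
    intro j hch hdj
    obtain ⟨j', rfl⟩ : ∃ j', j = j' + 1 := ⟨j - 1, by omega⟩
    have h0 := hch 0 (by omega)
    simp only [Nat.sub_zero] at h0
    rw [pvG, if_pos (by simpa using h0)]
    have : d + 1 ≤ pvG tokens j' := by
      refine ih j' (fun m hm => ?_) (by omega)
      have h1 : j' - m = j' + 1 - (m + 1) := by omega
      rw [h1]; exact hch (m + 1) (by omega)
    omega

-- generic max-fold helpers
theorem pv_foldl_max_le {l : List Nat} {a c : Nat} (ha : a ≤ c) (h : ∀ x ∈ l, x ≤ c) :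
    l.foldl max a ≤ c := by
  induction l generalizing a with
  | nil => simpa using ha
  | cons x t ih =>
    simp only [List.foldl_cons]
    exact ih (by have := h x (by simp); omega) (fun y hy => h y (by simp [hy]))

theorem pv_le_foldl_max {l : List Nat} {a x : Nat} (h : x ∈ l) : x ≤ l.foldl max a :=
  (PySem.List.le_foldl_max l a).2 x h

theorem pv_init_le_foldl_max (l : List Nat) (a : Nat) : a ≤ l.foldl max a :=
  (PySem.List.le_foldl_max l a).1

theorem pv_foldl_max_init (l : List Nat) (a b : Nat) :
    l.foldl max (max a b) = max a (l.foldl max b) := by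
  induction l generalizing b with
  | nil => simp
  | cons x t ih =>
    simp only [List.foldl_cons, Nat.max_assoc, ih]

theorem pv_foldl_max_out (l : List Nat) (f : Nat → Nat) (a : Nat) :
    l.foldl (fun acc x => max acc (f x)) a = max a ((l.map f).foldl max 0) := by
  induction l generalizing a with
  | nil => simp
  | cons x t ih =>
    simp only [List.foldl_cons, List.map_cons, ih, Nat.zero_max]
    rw [show f x = max (f x) 0 from (Nat.max_zero _).symm, pv_foldl_max_init, Nat.max_assoc,
      Nat.max_zero]

-- the single pass computes max of pvG over the prefix
theorem pvScan_inv (tokens : List String) (s : Nat) :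
    (List.range' 1 s).foldl (pvScanStep tokens) (1, 1) =
      (((List.range (s + 1)).map (pvG tokens)).foldl max 1, pvG tokens s) := by
  induction s with
  | zero => simp [pvG]
  | succ s ih =>
    have h1 : List.range' 1 (s + 1) = List.range' 1 s ++ [1 + s] := by
      simpa using List.range'_concat (step := 1) (s := 1) (n := s)
    have h2 : List.range (s + 1 + 1) = List.range (s + 1) ++ [s + 1] := List.range_succ
    rw [h1, List.foldl_append, ih, h2, List.map_append, List.foldl_append]
    simp only [List.map_cons, List.map_nil, List.foldl_cons, List.foldl_nil]
    have hadd : 1 + s = s + 1 := by omega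
    simp only [pvScanStep, hadd, Nat.add_sub_cancel]
    rw [show pvG tokens (s + 1) =
        (if tokens.getD (s + 1) "" = tokens.getD s "" then pvG tokens s + 1 else 1) from rfl]
    split <;> (rw [Prod.mk.injEq]; exact ⟨by split <;> omega, rfl⟩)

-- the two run maxima agree
theorem pv_part1 (tokens : List String) :
    ((List.range tokens.length).map (fun i => 1 + pvD tokens i)).foldl max 1 =
      ((List.range tokens.length).map (pvG tokens)).foldl max 1 := by
  apply Nat.le_antisymm
  · apply pv_foldl_max_le (pv_init_le_foldl_max _ 1)
    intro x hx
    simp only [List.mem_map, List.mem_range] at hx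
    obtain ⟨i, hi, rfl⟩ := hx
    obtain ⟨hch, hb⟩ := pvD_chain tokens (pvD tokens i) i (Nat.le_refl _) hi
    have hgb : pvD tokens i + 1 ≤ pvG tokens (i + pvD tokens i) := by
      apply pvG_of_chain
      · intro m hm
        have h1 : i + pvD tokens i - m = i + (pvD tokens i - m - 1) + 1 := by omega
        rw [h1, Nat.add_sub_cancel]
        exact hch (pvD tokens i - m - 1) (by omega)
      · omega
    have hmem : pvG tokens (i + pvD tokens i) ∈ (List.range tokens.length).map (pvG tokens) := by
      simp only [List.mem_map, List.mem_range]
      exact ⟨i + pvD tokens i, hb, rfl⟩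
    have := pv_le_foldl_max (a := 1) hmem
    omega
  · apply pv_foldl_max_le (pv_init_le_foldl_max _ 1)
    intro x hx
    simp only [List.mem_map, List.mem_range] at hx
    obtain ⟨j, hj, rfl⟩ := hx
    have hpos := pvG_pos tokens j
    obtain ⟨d, hd⟩ : ∃ d, pvG tokens j = d + 1 := ⟨pvG tokens j - 1, by omega⟩
    obtain ⟨hdj, hch⟩ := pvG_chain tokens j d hd
    have hDd : d ≤ pvD tokens (j - d) := by
      apply pvD_of_chain
      · intro m hm
        have h1 : j - d + m + 1 = j - (d - m - 1) := by omega
        have h2 : j - d + m = j - (d - m - 1) - 1 := by omega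
        rw [h1, h2]
        exact hch (d - m - 1) (by omega)
      · omega
    have hmem : 1 + pvD tokens (j - d) ∈
        (List.range tokens.length).map (fun i => 1 + pvD tokens i) := by
      simp only [List.mem_map, List.mem_range]
      exact ⟨j - d, by omega, rfl⟩
    have := pv_le_foldl_max (a := 1) hmem
    omega

-- A's first-to-chain comparison equals adjacent comparison, ngram version
theorem pvNgram_eq_R (tokens : List String) (k : Nat) (hk : 0 < k) (i : Nat) :
    1 + pvNgramCount tokens ((tokens.drop i).take k) k (i + k) = pvR tokens k i := by
  rw [pvNgramCount, pvR]
  by_cases h1 : i + k + k ≤ tokens.length ∧ 0 < k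
  · rw [dif_pos h1, PySem.List.slice_natCast]
    rw [show i + k + k - (i + k) = k from by omega]
    by_cases h2 : List.take k (List.drop (i + k) tokens) = List.take k (List.drop i tokens)
    · rw [if_pos h2, dif_pos ⟨by omega, hk, h2.symm⟩]
      have ih := pvNgram_eq_R tokens k hk (i + k)
      rw [← h2, ← ih]
    · rw [if_neg h2, dif_neg (fun hc => h2 hc.2.2.symm)]
  · rw [dif_neg h1, dif_neg (fun hc => h1 ⟨by omega, hk⟩)]
termination_by tokens.length - i
decreasing_by omega

theorem pvReps_length (tokens : List String) (k : Nat) (l0 : List Nat) (rng : List Nat) :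
    (rng.foldl (pvRepsStep tokens k) l0).length = l0.length := by
  induction rng generalizing l0 with
  | nil => rfl
  | cons x t ih =>
    simp only [List.foldl_cons]
    rw [ih]
    simp only [pvRepsStep]
    split <;> simp

-- the DP list holds pvR on the processed range
theorem pvReps_inv (tokens : List String) (k : Nat) (hk : 0 < k) (j : Nat)
    (hj : j ≤ tokens.length + 1 - 2 * k) :
    ∀ l < tokens.length + 1 - k,
      (((List.range' j (tokens.length + 1 - 2 * k - j)).reverse).foldl (pvRepsStep tokens k)
          (List.replicate (tokens.length + 1 - k) 1)).getD l 0 =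
        if j ≤ l ∧ l < tokens.length + 1 - 2 * k then pvR tokens k l else 1 := by
  by_cases hjm : j = tokens.length + 1 - 2 * k
  · intro l hl
    rw [show tokens.length + 1 - 2 * k - j = 0 from by omega]
    simp only [List.range'_zero, List.reverse_nil, List.foldl_nil]
    rw [List.getD_replicate 1 hl, if_neg (by omega)]
  · have hs : tokens.length + 1 - 2 * k - j = (tokens.length + 1 - 2 * k - (j + 1)) + 1 := by
      omega
    rw [hs, List.range'_succ, List.reverse_cons, List.foldl_append]
    simp only [List.foldl_cons, List.foldl_nil]
    set F := ((List.range' (j + 1) (tokens.length + 1 - 2 * k - (j + 1))).reverse).foldl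
      (pvRepsStep tokens k) (List.replicate (tokens.length + 1 - k) 1) with hF
    have IH := pvReps_inv tokens k hk (j + 1) (by omega)
    rw [← hF] at IH
    have hlen : F.length = tokens.length + 1 - k := by
      rw [hF, pvReps_length, List.length_replicate]
    have hjk_lt : j + k < tokens.length + 1 - k := by omega
    have hF1 : F.getD (j + k) 1 = F.getD (j + k) 0 := by
      obtain ⟨v, hv⟩ : ∃ v, F[j + k]? = some v :=
        ⟨_, List.getElem?_eq_getElem (by omega)⟩
      rw [List.getD_eq_getElem?_getD, List.getD_eq_getElem?_getD, hv]
      rfl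
    have hFjk : F.getD (j + k) 0 = pvR tokens k (j + k) := by
      by_cases hlt : j + k < tokens.length + 1 - 2 * k
      · rw [IH _ hjk_lt, if_pos ⟨by omega, hlt⟩]
      · rw [IH _ hjk_lt, if_neg (by omega), pvR,
          dif_neg (fun hc => absurd hc.1 (by omega))]
    have hR : pvR tokens k j =
        if (tokens.drop j).take k = (tokens.drop (j + k)).take k
        then 1 + pvR tokens k (j + k) else 1 := by
      rw [pvR]
      by_cases heq : (tokens.drop j).take k = (tokens.drop (j + k)).take k
      · rw [dif_pos ⟨by omega, hk, heq⟩, if_pos heq]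
      · rw [dif_neg (fun hc => heq hc.2.2), if_neg heq]
    have hs1 : PySem.List.slice tokens (some (j : Int)) (some ((j + k : Nat) : Int)) =
        (tokens.drop j).take k := by
      rw [PySem.List.slice_natCast, show j + k - j = k from by omega]
    have hs2 : PySem.List.slice tokens (some ((j + k : Nat) : Int))
        (some ((j + k + k : Nat) : Int)) = (tokens.drop (j + k)).take k := by
      rw [PySem.List.slice_natCast, show j + k + k - (j + k) = k from by omega]
    intro l hl
    simp only [pvRepsStep, hs1, hs2]
    by_cases heq : (tokens.drop j).take k = (tokens.drop (j + k)).take k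
    · rw [if_pos heq]
      rw [List.getD_eq_getElem?_getD, List.getElem?_set]
      by_cases hlj : j = l
      · subst hlj
        rw [if_pos rfl, if_pos (by omega), hF1, hFjk, if_pos ⟨Nat.le_refl _, by omega⟩,
          hR, if_pos heq]
        rfl
      · rw [if_neg hlj, ← List.getD_eq_getElem?_getD, IH l hl,
          if_congr (show (j + 1 ≤ l ∧ l < tokens.length + 1 - 2 * k) ↔
            (j ≤ l ∧ l < tokens.length + 1 - 2 * k) from by omega) rfl rfl]
    · rw [if_neg heq]
      by_cases hlj : l = j
      · subst hlj
        rw [IH l hl, if_neg (by omega), if_pos ⟨Nat.le_refl _, by omega⟩, hR, if_neg heq]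
      · rw [IH l hl,
          if_congr (show (j + 1 ≤ l ∧ l < tokens.length + 1 - 2 * k) ↔
            (j ≤ l ∧ l < tokens.length + 1 - 2 * k) from by omega) rfl rfl]
termination_by tokens.length + 1 - 2 * k - j
decreasing_by omega


-- A's first loop equals B's single pass
theorem pv_l1_eq (tokens : List String) :
    (List.range tokens.length).foldl
      (fun acc i => max acc (1 + pvRunCount tokens (tokens.getD i "") (i + 1))) 1
      = ((List.range tokens.length).map (pvG tokens)).foldl max 1 := by
  rw [PySem.List.foldl_congr_mem _ _ (fun acc i => max acc (1 + pvD tokens i)) 1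
    (fun acc i _ => by rw [pvRunCount_eq_D])]
  rw [← pv_part1]
  exact (List.foldl_map).symm

theorem pv_scan_fst (tokens : List String) (s : Nat) :
    ((List.range' 1 s).foldl (pvScanStep tokens) (1, 1)).1 =
      ((List.range (s + 1)).map (pvG tokens)).foldl max 1 := by
  rw [pvScan_inv]

-- A's inner ngram fold, normalised
theorem pv_A_k (tokens : List String) (k : Nat) (hk : 0 < k) (acc : Nat) :
    (List.range (tokens.length + 1 - 2 * k)).foldl
      (fun a2 i => max a2 (1 + pvNgramCount tokens
        (PySem.List.slice tokens (some ((i : Nat) : Int)) (some ((i + k : Nat) : Int))) k (i + k))) acc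
    = max acc (((List.range (tokens.length + 1 - 2 * k)).map (pvR tokens k)).foldl max 0) := by
  rw [PySem.List.foldl_congr_mem _ _ (fun a2 i => max a2 (pvR tokens k i)) acc ?_]
  · rw [pv_foldl_max_out]
  · intro a2 i _
    rw [PySem.List.slice_natCast, show i + k - i = k from by omega, pvNgram_eq_R tokens k hk i]

-- B's per-ngram-size branch, normalised
theorem pv_B_k (tokens : List String) (k : Nat) (hk : 0 < k) (acc : Nat) :
    (if tokens.length + 1 - 2 * k = 0 then acc else
      if ((((List.range (tokens.length + 1 - 2 * k)).reverse).foldl (pvRepsStep tokens k)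
            (List.replicate (tokens.length + 1 - k) 1)).take
              (tokens.length + 1 - 2 * k)).foldl max 0 > acc
      then ((((List.range (tokens.length + 1 - 2 * k)).reverse).foldl (pvRepsStep tokens k)
            (List.replicate (tokens.length + 1 - k) 1)).take
              (tokens.length + 1 - 2 * k)).foldl max 0
      else acc)
    = max acc (((List.range (tokens.length + 1 - 2 * k)).map (pvR tokens k)).foldl max 0) := by
  by_cases hm : tokens.length + 1 - 2 * k = 0
  · rw [if_pos hm, hm]
    simp
  · rw [if_neg hm]
    have hlen : (((List.range (tokens.length + 1 - 2 * k)).reverse).foldl (pvRepsStep tokens k)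
        (List.replicate (tokens.length + 1 - k) 1)).length = tokens.length + 1 - k := by
      rw [pvReps_length, List.length_replicate]
    have hrt : (((List.range (tokens.length + 1 - 2 * k)).reverse).foldl (pvRepsStep tokens k)
        (List.replicate (tokens.length + 1 - k) 1)).take (tokens.length + 1 - 2 * k)
        = (List.range (tokens.length + 1 - 2 * k)).map (pvR tokens k) := by
      apply List.ext_getElem
      · rw [List.length_take, List.length_map, List.length_range, hlen]
        omega
      · intro idx h1 h2
        rw [List.length_take, hlen] at h1
        rw [List.getElem_take, List.getElem_map, List.getElem_range]
        have hinv := pvReps_inv tokens k hk 0 (by omega) idx (by omega)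
        rw [Nat.sub_zero, ← List.range_eq_range'] at hinv
        rw [if_pos ⟨Nat.zero_le _, by omega⟩] at hinv
        rw [List.getD_eq_getElem?_getD, List.getElem?_eq_getElem (by omega)] at hinv
        simpa using hinv
    rw [hrt]
    split <;> omega

-- ===== VERDICT (by name: the statement is the Claim_ definition above) =====
theorem max_repetition_run_spec : Claim_equal_max_repetition_run := by
  intro tokens _
  unfold Spec_max_repetition_run
  by_cases hnil : tokens = []
  · subst hnil
    decide
  · have hn : 0 < tokens.length := List.length_pos_iff.mpr hnil
    simp only [max_repetition_run, max_repetition_run_alt]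
    rw [if_neg (show ¬(tokens.length = 0) from by omega),
      if_neg (show ¬(tokens.length = 0) from by omega)]
    rw [pv_l1_eq, pv_scan_fst tokens (tokens.length - 1),
      show tokens.length - 1 + 1 = tokens.length from by omega]
    simp only [List.foldl_cons, List.foldl_nil]
    rw [pv_A_k tokens 2 (by omega), pv_A_k tokens 3 (by omega),
      pv_B_k tokens 2 (by omega), pv_B_k tokens 3 (by omega)]
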